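-- pv_equiv track=rewrite | github.com/lucasgommes/game | section.py | createSecGame
-- ===== SOURCE A (Python) =====
-- sec_1 = [1,2,3,4,5]
--
-- sec_2 = [6,7,8,9,10]
--
-- sec_3 = [11,12,13,14,15]
--
-- sec_4 = [16,17,18,19,20]
--
-- sec_5 = [21,22,23,24,25]
--
-- def createSecGame(lis): #Cria a formação do jogo informado no parâmetro
--     secs = [sec_1,sec_2,sec_3,sec_4,sec_5]
--
--     lisNumber = []
--     for index in secs:
--         contAux = 0
--         for num in index:
--             if num in lis:
--                 contAux+=1
--         lisNumber.append(contAux)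
--     return lisNumber
-- ===== SOURCE B (Python) =====
-- def createSecGame(lis):
--     counts = [0, 0, 0, 0, 0]
--     for x in set(lis):
--         if 1 <= x <= 25:
--             counts[(x - 1) // 5] += 1
--     return counts
-- ===== Notes on version B (the rewrite author's own statement) =====
-- stated objective: faster
-- what changed: Instead of scanning the whole input once per number of each of the five fixed sections (25 membership scans), B dedups the input into a set and makes one pass over it, bucketing each value 1..25 into counts[(x-1)//5].
import Mathlib
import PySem

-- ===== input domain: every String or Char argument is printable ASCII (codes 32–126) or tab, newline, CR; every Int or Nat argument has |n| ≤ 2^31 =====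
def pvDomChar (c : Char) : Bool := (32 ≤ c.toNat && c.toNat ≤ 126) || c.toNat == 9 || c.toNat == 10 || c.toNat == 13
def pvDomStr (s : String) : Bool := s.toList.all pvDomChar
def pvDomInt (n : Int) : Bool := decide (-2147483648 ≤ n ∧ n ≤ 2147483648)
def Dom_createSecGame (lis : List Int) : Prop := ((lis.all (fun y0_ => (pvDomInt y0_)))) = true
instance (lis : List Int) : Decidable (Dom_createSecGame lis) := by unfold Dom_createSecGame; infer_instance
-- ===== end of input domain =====

-- B replaces A's 25 membership scans of the input (one per number of the five fixed sections)
-- by a single bucketing pass over the deduplicated input; return values are identical.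

-- ===== PORT A =====
def createSecGame (lis : List Int) : List Int :=
  let secs : List (List Int) :=
    [[1,2,3,4,5],[6,7,8,9,10],[11,12,13,14,15],[16,17,18,19,20],[21,22,23,24,25]]
  secs.foldl (fun lisNumber index =>
    lisNumber ++ [index.foldl (fun contAux num => if num ∈ lis then contAux + 1 else contAux) (0 : Int)]) []

-- ===== PORT B =====
def createSecGame_alt (lis : List Int) : List Int :=
  (PySem.Set.ofList lis).foldl (fun counts x =>
    if 1 ≤ x ∧ x ≤ 25 then
      let i := (PySem.Int.floordiv (x - 1) 5).toNat
      counts.set i (counts.getD i 0 + 1)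
    else counts) [0,0,0,0,0]

-- ===== PRECONDITION & SPEC =====
def Spec_createSecGame (lis : List Int) (out : List Int) : Prop := out = createSecGame_alt lis
instance (lis : List Int) (out : List Int) : Decidable (Spec_createSecGame lis out) := by unfold Spec_createSecGame; infer_instance

-- ===== CLAIM (what is proved, stated in full; the proofs are below) =====
def Claim_equal_createSecGame : Prop := ∀ (lis : List Int), Dom_createSecGame lis → Spec_createSecGame lis (createSecGame lis)

-- ===== LEMMAS AND PROOFS =====

-- count of elements of s lying in [lo, hi]
def rangeCount (lo hi : Int) (s : List Int) : Int :=
  (s.countP (fun x => decide (lo ≤ x ∧ x ≤ hi)) : Int)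

lemma alt_fold_inv (s : List Int) (a b c d e : Int) :
    s.foldl (fun counts x =>
      if 1 ≤ x ∧ x ≤ 25 then
        let i := (PySem.Int.floordiv (x - 1) 5).toNat
        counts.set i (counts.getD i 0 + 1)
      else counts) [a,b,c,d,e] =
    [a + rangeCount 1 5 s, b + rangeCount 6 10 s, c + rangeCount 11 15 s,
     d + rangeCount 16 20 s, e + rangeCount 21 25 s] := by
  induction s generalizing a b c d e with
  | nil => simp [rangeCount]
  | cons x s ih =>
    rw [List.foldl_cons]
    by_cases hx : 1 ≤ x ∧ x ≤ 25
    · rcases (by omega : (1 ≤ x ∧ x ≤ 5) ∨ (6 ≤ x ∧ x ≤ 10) ∨ (11 ≤ x ∧ x ≤ 15) ∨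
        (16 ≤ x ∧ x ≤ 20) ∨ (21 ≤ x ∧ x ≤ 25)) with h | h | h | h | h
      all_goals
        first
        | (have hf : PySem.Int.floordiv (x - 1) 5 = 0 :=
            (PySem.Int.floordiv_eq_iff_of_pos (by norm_num)).mpr (by omega))
        | (have hf : PySem.Int.floordiv (x - 1) 5 = 1 :=
            (PySem.Int.floordiv_eq_iff_of_pos (by norm_num)).mpr (by omega))
        | (have hf : PySem.Int.floordiv (x - 1) 5 = 2 :=
            (PySem.Int.floordiv_eq_iff_of_pos (by norm_num)).mpr (by omega))
        | (have hf : PySem.Int.floordiv (x - 1) 5 = 3 :=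
            (PySem.Int.floordiv_eq_iff_of_pos (by norm_num)).mpr (by omega))
        | (have hf : PySem.Int.floordiv (x - 1) 5 = 4 :=
            (PySem.Int.floordiv_eq_iff_of_pos (by norm_num)).mpr (by omega))
      all_goals
        rw [if_pos hx]
        simp only [hf, Int.toNat_zero, Int.toNat_one,
          (show ((2:Int).toNat = 2) from rfl), (show ((3:Int).toNat = 3) from rfl),
          (show ((4:Int).toNat = 4) from rfl),
          List.set_cons_zero, List.set_cons_succ, List.getD_cons_zero, List.getD_cons_succ]
        rw [ih]
        simp [rangeCount, List.countP_cons]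
        omega
    · simp only [if_neg hx, ih]
      simp [rangeCount, List.countP_cons]
      omega

lemma inner_count (lis sec : List Int) :
    sec.foldl (fun contAux num => if num ∈ lis then contAux + 1 else contAux) (0 : Int) =
    (sec.countP (fun n => decide (n ∈ lis)) : Int) := by
  simpa using PySem.List.foldl_count_if (fun n => decide (n ∈ lis)) sec 0

lemma inter_count (l L : List Int) (hl : l.Nodup) (hL : L.Nodup) :
    L.countP (fun n => decide (n ∈ l)) = l.countP (fun x => decide (x ∈ L)) := by
  simp only [List.countP_eq_length_filter]
  exact ((List.perm_ext_iff_of_nodup (hL.filter _) (hl.filter _)).mpr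
    (by intro x; simp only [List.mem_filter, decide_eq_true_eq]; tauto)).length_eq

lemma sec_count (lis : List Int) (L : List Int) (lo hi : Int) (hL : L.Nodup)
    (hmem : ∀ x, x ∈ L ↔ lo ≤ x ∧ x ≤ hi) :
    (L.countP (fun n => decide (n ∈ lis)) : Int) = rangeCount lo hi (PySem.Set.ofList lis) := by
  have h1 : L.countP (fun n => decide (n ∈ PySem.Set.ofList lis)) =
      (PySem.Set.ofList lis).countP (fun x => decide (x ∈ L)) :=
    inter_count _ _ (PySem.Set.nodup_ofList lis) hL
  have h2 : L.countP (fun n => decide (n ∈ lis)) =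
      L.countP (fun n => decide (n ∈ PySem.Set.ofList lis)) := by
    apply List.countP_congr; intro n _; simp [PySem.Set.mem_ofList]
  have h3 : (PySem.Set.ofList lis).countP (fun x => decide (x ∈ L)) =
      (PySem.Set.ofList lis).countP (fun x => decide (lo ≤ x ∧ x ≤ hi)) := by
    apply List.countP_congr; intro n _; simp [hmem]
  rw [rangeCount, h2, h1, h3]

-- ===== VERDICT (by name: the statement is the Claim_ definition above) =====
theorem createSecGame_spec : Claim_equal_createSecGame := by
  intro lis _
  show createSecGame lis = createSecGame_alt lis
  rw [createSecGame_alt, alt_fold_inv]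
  simp only [createSecGame, List.foldl_cons, List.foldl_nil, List.nil_append,
    List.append_assoc, List.singleton_append, inner_count]
  rw [sec_count lis [1,2,3,4,5] 1 5 (by decide) (by intro x; simp; omega),
      sec_count lis [6,7,8,9,10] 6 10 (by decide) (by intro x; simp; omega),
      sec_count lis [11,12,13,14,15] 11 15 (by decide) (by intro x; simp; omega),
      sec_count lis [16,17,18,19,20] 16 20 (by decide) (by intro x; simp; omega),
      sec_count lis [21,22,23,24,25] 21 25 (by decide) (by intro x; simp; omega)]
  simp
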